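-- pv_equiv track=rewrite | github.com/Ambal292531/qqq | 15-19.py | check_columns
-- ===== SOURCE A (Python) =====
-- def check_columns(matrix, number):
--     n = len(matrix)
--     m = len(matrix[0])
--     columns_with_number = []
--     columns_without_number = []
--     for j in range(m):
--         has_number = False
--         for i in range(n):
--             if matrix[i][j] == number:
--                 has_number = True
--                 break
--         if has_number:
--             columns_with_number.append(j)
--         else:
--             columns_without_number.append(j)
--     return columns_with_number, columns_without_number
--
-- number = 3
--
-- matrix = [
--     [1, 2, 3],
--     [4, 5, 6],
--     [7, 8, 9]
-- ]
-- ===== SOURCE B (Python) =====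
-- def check_columns(matrix, number):
--     n = len(matrix)
--     m = len(matrix[0])
--     present = set()
--     for i in range(n):
--         for j in range(m):
--             if matrix[i][j] == number:
--                 present.add(j)
--     columns_with_number = []
--     columns_without_number = []
--     for j in range(m):
--         if j in present:
--             columns_with_number.append(j)
--         else:
--             columns_without_number.append(j)
--     return columns_with_number, columns_without_number
-- ===== Notes on version B (the rewrite author's own statement) =====
-- stated objective: alternative
-- what changed: B replaces the per-column scan with an early break by one row-major sweep that collects the set of column indices containing the value, then classifies columns by set membership.
-- outside the precondition, e.g. on check_columns([[3, 3], [3]], 3): A returns ([0, 1], []), B raises IndexError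
import Mathlib
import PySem

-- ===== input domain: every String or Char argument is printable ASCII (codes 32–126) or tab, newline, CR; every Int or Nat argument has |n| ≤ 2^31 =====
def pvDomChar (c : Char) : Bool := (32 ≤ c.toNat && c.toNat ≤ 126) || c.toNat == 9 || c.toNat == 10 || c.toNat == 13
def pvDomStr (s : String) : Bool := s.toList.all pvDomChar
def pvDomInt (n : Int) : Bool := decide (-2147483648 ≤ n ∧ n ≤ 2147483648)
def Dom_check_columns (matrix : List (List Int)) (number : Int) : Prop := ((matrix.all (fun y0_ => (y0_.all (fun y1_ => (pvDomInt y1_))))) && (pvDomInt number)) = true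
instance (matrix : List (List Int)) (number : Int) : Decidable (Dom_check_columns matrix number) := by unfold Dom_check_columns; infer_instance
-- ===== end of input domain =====

-- B classifies columns by membership in a set of hit columns built in one row-major sweep,
-- instead of A's per-column scan with an early break; same cost, different traversal (objective: alternative).

-- ===== PORT A =====
-- inner loop 'for i in range(n): if matrix[i][j] == number: has_number = True; break'
-- (recursion over the rows; row.getD j 0 is matrix[i][j], exact under Pre_ where j < row.length)
def colHasA (number : Int) (j : Nat) : List (List Int) → Bool
  | [] => false
  | row :: rest => if row.getD j 0 == number then true else colHasA number j rest

def check_columns (matrix : List (List Int)) (number : Int) : List Int × List Int :=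
  let m := (matrix.getD 0 []).length
  (List.range m).foldl
    (fun acc j =>
      if colHasA number j matrix then (acc.1 ++ [(j : Int)], acc.2)
      else (acc.1, acc.2 ++ [(j : Int)]))
    ([], [])

-- ===== PORT B =====
def check_columns_alt (matrix : List (List Int)) (number : Int) : List Int × List Int :=
  let m := (matrix.getD 0 []).length
  let present : PySem.Set Nat :=
    matrix.foldl
      (fun s row =>
        (List.range m).foldl
          (fun s j => if row.getD j 0 == number then PySem.Set.add s j else s) s)
      PySem.Set.empty
  (List.range m).foldl
    (fun acc j =>
      if PySem.Set.contains present j then (acc.1 ++ [(j : Int)], acc.2)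
      else (acc.1, acc.2 ++ [(j : Int)]))
    ([], [])

-- ===== PRECONDITION & SPEC =====
-- Pre_ excludes the empty matrix (A raises IndexError on matrix[0]) and matrices whose first row is
-- longer than some later row: there A may raise, or return via its early break while B's full sweep
-- raises IndexError — a ragged input neither program is specified for.
def Pre_check_columns (matrix : List (List Int)) (_number : Int) : Prop :=
  matrix ≠ [] ∧ ∀ row ∈ matrix, (matrix.getD 0 []).length ≤ row.length
instance (matrix : List (List Int)) (number : Int) : Decidable (Pre_check_columns matrix number) := by unfold Pre_check_columns; infer_instance

def pvWitness_check_columns : List (List Int) × Int := ([[1, 2, 3], [4, 5, 6], [7, 8, 9]], 3)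

def Spec_check_columns (matrix : List (List Int)) (number : Int) (out : List Int × List Int) : Prop := out = check_columns_alt matrix number
instance (matrix : List (List Int)) (number : Int) (out : List Int × List Int) : Decidable (Spec_check_columns matrix number out) := by unfold Spec_check_columns; infer_instance

-- ===== CLAIM (what is proved, stated in full; the proofs are below) =====
def Claim_equal_check_columns : Prop := ∀ (matrix : List (List Int)) (number : Int), Dom_check_columns matrix number → Pre_check_columns matrix number → Spec_check_columns matrix number (check_columns matrix number)

-- ===== LEMMAS AND PROOFS =====

theorem colHasA_eq_any (number : Int) (j : Nat) (l : List (List Int)) :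
    colHasA number j l = l.any (fun row => row.getD j 0 == number) := by
  induction l with
  | nil => rfl
  | cons row rest ih =>
    unfold colHasA
    split_ifs with h
    · rw [List.any_cons, h, Bool.true_or]
    · rw [Bool.not_eq_true] at h
      rw [List.any_cons, h, Bool.false_or, ih]

theorem mem_inner (number : Int) (row : List Int) (m j : Nat) (s : PySem.Set Nat) :
    (j ∈ (List.range m).foldl
      (fun s j' => if row.getD j' 0 == number then PySem.Set.add s j' else s) s)
    ↔ j ∈ s ∨ (j < m ∧ row.getD j 0 == number) := by
  induction m with
  | zero => simp
  | succ m ih =>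
    rw [List.range_succ, List.foldl_append, List.foldl_cons, List.foldl_nil]
    split_ifs with h
    · rw [PySem.Set.mem_add, ih]
      constructor
      · rintro ((hs | ⟨hj, hr⟩) | rfl)
        · exact Or.inl hs
        · exact Or.inr ⟨Nat.lt_succ_of_lt hj, hr⟩
        · exact Or.inr ⟨Nat.lt_succ_self _, h⟩
      · rintro (hs | ⟨hj, hr⟩)
        · exact Or.inl (Or.inl hs)
        · rcases Nat.lt_succ_iff_lt_or_eq.mp hj with hj' | rfl
          · exact Or.inl (Or.inr ⟨hj', hr⟩)
          · exact Or.inr rfl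
    · rw [ih]
      constructor
      · rintro (hs | ⟨hj, hr⟩)
        · exact Or.inl hs
        · exact Or.inr ⟨Nat.lt_succ_of_lt hj, hr⟩
      · rintro (hs | ⟨hj, hr⟩)
        · exact Or.inl hs
        · rcases Nat.lt_succ_iff_lt_or_eq.mp hj with hj' | rfl
          · exact Or.inr ⟨hj', hr⟩
          · exact (h hr).elim

theorem mem_outer (number : Int) (m j : Nat) (l : List (List Int)) (s : PySem.Set Nat) :
    (j ∈ l.foldl
      (fun s row => (List.range m).foldl
        (fun s j' => if row.getD j' 0 == number then PySem.Set.add s j' else s) s) s)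
    ↔ j ∈ s ∨ (j < m ∧ l.any (fun row => row.getD j 0 == number)) := by
  induction l generalizing s with
  | nil => simp
  | cons row rest ih =>
    rw [List.foldl_cons, ih, mem_inner, List.any_cons, Bool.or_eq_true]
    tauto

-- ===== VERDICT (by name: the statement is the Claim_ definition above) =====
theorem check_columns_spec : Claim_equal_check_columns := by
  intro matrix number _ _
  unfold Spec_check_columns check_columns check_columns_alt
  apply PySem.List.foldl_congr_mem
  intro acc j hj
  have hj' : j < (matrix.getD 0 []).length := List.mem_range.mp hj
  have hmem : (j ∈ matrix.foldl
      (fun s row => (List.range (matrix.getD 0 []).length).foldl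
        (fun s j' => if row.getD j' 0 == number then PySem.Set.add s j' else s) s)
      PySem.Set.empty)
      ↔ (j < (matrix.getD 0 []).length ∧
         matrix.any (fun row => row.getD j 0 == number)) := by
    rw [mem_outer]
    have : ¬ (j ∈ (PySem.Set.empty : PySem.Set Nat)) := by simp [PySem.Set.empty]
    tauto
  have hc : PySem.Set.contains
      (matrix.foldl
        (fun s row => (List.range (matrix.getD 0 []).length).foldl
          (fun s j' => if row.getD j' 0 == number then PySem.Set.add s j' else s) s)
        PySem.Set.empty) j
      = colHasA number j matrix := by
    rw [colHasA_eq_any]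
    cases hany : matrix.any (fun row => row.getD j 0 == number) with
    | true => exact (PySem.Set.contains_iff _ _).mpr (hmem.mpr ⟨hj', hany⟩)
    | false =>
      rw [Bool.eq_false_iff]
      intro hc
      have := (hmem.mp ((PySem.Set.contains_iff _ _).mp hc)).2
      rw [hany] at this
      exact Bool.false_ne_true this
  rw [hc]
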